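-- pv_equiv track=rewrite | github.com/iworm/nimei-python-exercise | nimei.py | getFirstLetter
-- ===== SOURCE A (Python) =====
-- def getFirstLetter(text):
--     if len(text) == 0:
--         return ''
--
--     if text[0] == '[':
--         text = text.partition(']')[2]
--
--
--     if text[0] == '@':
--         text = getFirstLetter(text.partition(' ')[2])
--     elif text[0] == '/':
--         text = '转'
--     else:
--         text = text[0]
--
--     if len(text) == 0:
--         text = ''
--     else:
--         text = text[0]
--
--     return text
-- ===== SOURCE B (Python) =====
-- def getFirstLetter(text):
--     # Index-based scan: never builds substrings; walks a cursor i through the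
--     # original string using str.find, then maps the found character once.
--     n = len(text)
--     i = 0
--     while True:
--         if i >= n:
--             return ''
--         if text[i] == '[':
--             j = text.find(']', i)
--             i = n if j < 0 else j + 1
--             if i >= n:
--                 return ''
--         c = text[i]
--         if c != '@':
--             break
--         j = text.find(' ', i)
--         i = n if j < 0 else j + 1
--     return '转' if c == '/' else c
-- ===== Notes on version B (the rewrite author's own statement) =====
-- stated objective: alternative
-- what changed: Replaces A's self-recursion on freshly built substrings (partition slices) by an index-based scan that walks a cursor through the original string with str.find and maps the found character once at the end.
import Mathlib
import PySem

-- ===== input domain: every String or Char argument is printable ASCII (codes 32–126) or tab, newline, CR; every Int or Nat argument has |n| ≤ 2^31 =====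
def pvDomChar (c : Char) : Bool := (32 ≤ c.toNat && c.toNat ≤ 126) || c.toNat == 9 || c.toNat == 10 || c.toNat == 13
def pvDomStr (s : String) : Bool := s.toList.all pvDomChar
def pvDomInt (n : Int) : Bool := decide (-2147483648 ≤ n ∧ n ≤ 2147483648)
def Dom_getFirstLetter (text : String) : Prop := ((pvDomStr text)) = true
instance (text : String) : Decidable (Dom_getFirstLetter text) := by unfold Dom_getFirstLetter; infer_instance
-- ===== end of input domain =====

-- B replaces A's substring-building self-recursion by an index-based scan over the
-- original string (a cursor advanced with str.find), mapping the found character once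
-- at the end (objective: alternative).

-- ===== PORT A =====
-- `text.partition(sep)[2]` for a one-char separator: everything after the first
-- occurrence of `sep`, `[]` if absent (exact).
def afterSep (sep : Char) : List Char → List Char
  | [] => []
  | c :: cs => if c = sep then cs else afterSep sep cs

theorem afterSep_length_le (sep : Char) (l : List Char) :
    (afterSep sep l).length ≤ l.length := by
  induction l with
  | nil => simp [afterSep]
  | cons c cs ih => simp only [afterSep]; split <;> simp <;> omega

-- A's body over List Char; where Python raises IndexError (after a '[' strip the
-- string is empty) the port returns [] — those inputs are outside Pre_.
def goA (l : List Char) : List Char :=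
  match l with
  | [] => []
  | c0 :: cs0 =>
    match h : (if c0 = '[' then afterSep ']' cs0 else c0 :: cs0) with
    | [] => []          -- Python: IndexError here (excluded by Pre_)
    | c :: rest =>
      let t := if c = '@' then goA (afterSep ' ' rest)
               else if c = '/' then ['转'] else [c]
      match t with
      | [] => []
      | d :: _ => [d]
termination_by l.length
decreasing_by
  have h1 := afterSep_length_le ' ' rest
  split at h
  · have := afterSep_length_le ']' cs0
    have h2 : (c :: rest).length ≤ cs0.length := h ▸ this
    simp at h2 ⊢; omega
  · have h2 : cs0 = rest := (List.cons.injEq .. ▸ h).2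
    subst h2; simp; omega

def getFirstLetter (text : String) : String := String.ofList (goA text.toList)

-- ===== PORT B =====
-- `text.find(sep, i)` for a one-char separator, hand-ported: scans `l.drop i`
-- carrying the absolute index (exact; Python's -1 is rendered as `none`).
def findIdxFrom (sep : Char) : List Char → Nat → Option Nat
  | [], _ => none
  | c :: cs, i => if c = sep then some i else findIdxFrom sep cs (i + 1)

theorem findIdxFrom_ge (sep : Char) : ∀ (m : List Char) (i j : Nat),
    findIdxFrom sep m i = some j → i ≤ j := by
  intro m
  induction m with
  | nil => intro i j h; simp [findIdxFrom] at h
  | cons c cs ih =>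
    intro i j h
    simp only [findIdxFrom] at h
    split at h
    · cases h; omega
    · have := ih (i + 1) j h; omega

-- B's `i = n if j < 0 else j + 1` cursor update after a find from position i.
def nextIdx (sep : Char) (l : List Char) (i : Nat) : Nat :=
  match findIdxFrom sep (l.drop i) i with
  | none => l.length
  | some j => j + 1

theorem nextIdx_gt (sep : Char) (l : List Char) (i : Nat) (h : i < l.length) :
    i < nextIdx sep l i := by
  cases hf : findIdxFrom sep (l.drop i) i with
  | none => simp only [nextIdx, hf]; exact h
  | some j =>
    have := findIdxFrom_ge sep _ _ _ hf
    simp only [nextIdx, hf]; omega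

-- the cursor after B's '['-handling section
def bracketAdv (l : List Char) (i : Nat) : Nat :=
  if l[i]! = '[' then nextIdx ']' l i else i

theorem bracketAdv_ge (l : List Char) (i : Nat) (h : i < l.length) :
    i ≤ bracketAdv l i := by
  unfold bracketAdv
  split
  · exact le_of_lt (nextIdx_gt ']' l i h)
  · exact le_rfl

-- B's while-loop as a cursor recursion over the unmodified string; the early
-- `return ''` after a '[' strip is where Python A raises (outside Pre_).
def goB (l : List Char) (i : Nat) : String :=
  if l.length ≤ i then ""
  else
    let i1 := bracketAdv l i
    if l.length ≤ i1 then ""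
    else if l[i1]! = '@' then goB l (nextIdx ' ' l i1)
    else if l[i1]! = '/' then "转" else String.ofList [l[i1]!]
termination_by l.length - i
decreasing_by
  have h1 : i ≤ bracketAdv l i := bracketAdv_ge l i (by omega)
  have h2 := nextIdx_gt ' ' l (bracketAdv l i) (by omega)
  omega

def getFirstLetter_alt (text : String) : String := goB text.toList 0

-- ===== PRECONDITION & SPEC =====
-- Pre_ excludes exactly the inputs on which Python A raises IndexError: during the
-- stripping process some intermediate text starts with '[' but nothing follows its
-- first ']'. Which suffixes the process reaches is inherently iterative, so Pre_
-- states it with library function iteration (`Nat.iterate` of the one-step suffix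
-- map, at most `length` steps, which always suffices since each step that continues
-- strictly shortens the text); Pre_ is exact, not a narrowing.
def preStep (st : List Char × Bool) : List Char × Bool :=
  if st.2 then st
  else
    let m1 := if st.1.head? = some '[' then (st.1.dropWhile (fun c => c ≠ ']')).drop 1 else st.1
    if m1.head? = some '@' then ((m1.dropWhile (fun c => c ≠ ' ')).drop 1, false) else (m1, true)

-- a state about to raise: running, nonempty, but the '['-strip leaves nothing
def preBad (st : List Char × Bool) : Bool :=
  !st.2 && !st.1.isEmpty &&
    (if st.1.head? = some '[' then (st.1.dropWhile (fun c => c ≠ ']')).drop 1 else st.1).isEmpty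

def Pre_getFirstLetter (text : String) : Prop :=
  ∀ k ∈ List.range (text.toList.length + 1), preBad (preStep^[k] (text.toList, false)) = false
instance (text : String) : Decidable (Pre_getFirstLetter text) := by
  unfold Pre_getFirstLetter; infer_instance
def pvWitness_getFirstLetter : String := "[x]@a b"

def Spec_getFirstLetter (text : String) (out : String) : Prop := out = getFirstLetter_alt text
instance (text : String) (out : String) : Decidable (Spec_getFirstLetter text out) := by
  unfold Spec_getFirstLetter; infer_instance

-- ===== CLAIM (what is proved, stated in full; the proofs are below) =====
def Claim_equal_getFirstLetter : Prop := ∀ (text : String), Dom_getFirstLetter text → Pre_getFirstLetter text → Spec_getFirstLetter text (getFirstLetter text)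

-- ===== LEMMAS AND PROOFS =====

theorem afterSep_eq_none (sep : Char) : ∀ (m : List Char) (i : Nat),
    findIdxFrom sep m i = none → afterSep sep m = [] := by
  intro m
  induction m with
  | nil => intro i _; rfl
  | cons c cs ih =>
    intro i h
    simp only [findIdxFrom] at h
    split at h
    · exact absurd h (by simp)
    · rename_i hc; simp only [afterSep, if_neg hc]; exact ih (i + 1) h

theorem afterSep_eq_some (sep : Char) : ∀ (m : List Char) (i j : Nat),
    findIdxFrom sep m i = some j → afterSep sep m = m.drop (j + 1 - i) := by
  intro m
  induction m with
  | nil => intro i j h; simp [findIdxFrom] at h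
  | cons c cs ih =>
    intro i j h
    simp only [findIdxFrom] at h
    split at h
    · rename_i hc
      have hj : j = i := by simpa using h.symm
      subst hj
      simp [afterSep, hc]
    · rename_i hc
      have hge := findIdxFrom_ge sep cs (i + 1) j h
      have hd : j + 1 - i = (j + 1 - (i + 1)) + 1 := by omega
      simp only [afterSep, if_neg hc, hd, List.drop_succ_cons]
      exact ih (i + 1) j h

theorem afterSep_drop (sep : Char) (l : List Char) (i : Nat) :
    afterSep sep (l.drop i) = l.drop (nextIdx sep l i) := by
  cases hf : findIdxFrom sep (l.drop i) i with
  | none =>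
    simp only [nextIdx, hf]
    simp [afterSep_eq_none sep _ _ hf]
  | some j =>
    have hge := findIdxFrom_ge sep _ _ _ hf
    simp only [nextIdx, hf]
    rw [afterSep_eq_some sep _ _ _ hf, List.drop_drop]
    congr 1
    omega


theorem drop_cons_getElem (l : List Char) (i : Nat) (h : i < l.length) :
    l.drop i = l[i] :: l.drop (i + 1) := by
  exact (List.getElem_cons_drop h).symm

theorem goA_cons (c0 : Char) (cs0 : List Char) :
    goA (c0 :: cs0) =
      match (if c0 = '[' then afterSep ']' cs0 else c0 :: cs0) with
      | [] => []
      | c :: rest =>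
        if c = '@' then
          (match goA (afterSep ' ' rest) with | [] => [] | d :: _ => [d])
        else if c = '/' then ['转'] else [c] := by
  rw [goA]
  split
  · rename_i heq
    rw [heq]
  · rename_i c rest heq
    rw [heq]
    by_cases hc : c = '@'
    · simp only [if_pos hc]
    · simp only [if_neg hc]
      by_cases h2 : c = '/' <;> simp [h2]

theorem goA_len (m : List Char) : (goA m).length ≤ 1 := by
  cases m with
  | nil => simp [goA]
  | cons c0 cs0 =>
    rw [goA_cons]
    split
    · simp
    · split
      · split <;> simp
      · split <;> simp

theorem goA_final (m : List Char) :
    (match goA m with | [] => ([] : List Char) | d :: _ => [d]) = goA m := by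
  cases h : goA m with
  | nil => rfl
  | cons d ds =>
    have hlen := goA_len m
    rw [h] at hlen
    have : ds = [] := by cases ds <;> simp_all
    subst this; rfl

theorem goB_eq_goA (l : List Char) : ∀ (n i : Nat), l.length - i ≤ n →
    (goB l i).toList = goA (l.drop i) := by
  intro n
  induction n with
  | zero =>
    intro i hn
    have hlen : l.length ≤ i := by omega
    rw [goB.eq_def, if_pos hlen, List.drop_of_length_le hlen]
    simp [goA]
  | succ n ih =>
    intro i hn
    by_cases h : l.length ≤ i
    · rw [goB.eq_def, if_pos h, List.drop_of_length_le h]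
      simp [goA]
    · have hi' : i < l.length := by omega
      have hbang : l[i]! = l[i]'hi' := getElem!_pos l i hi'
      rw [goB.eq_def]
      simp only [if_neg h]
      set i1 := bracketAdv l i with hi1def
      have hii1 : i ≤ i1 := bracketAdv_ge l i hi'
      have hscrut : (if (l[i]'hi') = '[' then afterSep ']' (l.drop (i + 1))
          else (l[i]'hi') :: l.drop (i + 1)) = l.drop i1 := by
        rw [hi1def]
        unfold bracketAdv
        rw [hbang]
        split
        · rename_i hbr
          have h1 : afterSep ']' (l.drop i) = afterSep ']' (l.drop (i + 1)) := by
            rw [drop_cons_getElem l i hi']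
            simp only [afterSep]
            rw [if_neg]
            rw [hbr]
            decide
          rw [← h1, afterSep_drop]
        · exact (drop_cons_getElem l i hi').symm
      rw [drop_cons_getElem l i hi', goA_cons, hscrut]
      by_cases h2 : l.length ≤ i1
      · rw [if_pos h2, List.drop_of_length_le h2]
        rfl
      · have hi1' : i1 < l.length := by omega
        have hbang1 : l[i1]! = l[i1]'hi1' := getElem!_pos l i1 hi1'
        rw [if_neg h2, drop_cons_getElem l i1 hi1']
        simp only [hbang1]
        by_cases hat : (l[i1]'hi1') = '@'
        · rw [if_pos hat]
          simp only [if_pos hat]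
          have hsp : afterSep ' ' (l.drop (i1 + 1)) = l.drop (nextIdx ' ' l i1) := by
            have h1 : afterSep ' ' (l.drop i1) = afterSep ' ' (l.drop (i1 + 1)) := by
              rw [drop_cons_getElem l i1 hi1']
              simp only [afterSep]
              rw [if_neg]
              rw [hat]
              decide
            rw [← h1, afterSep_drop]
          rw [hsp, goA_final]
          have hgt := nextIdx_gt ' ' l i1 hi1'
          exact ih (nextIdx ' ' l i1) (by omega)
        · rw [if_neg hat]
          simp only [if_neg hat]
          by_cases hsl : (l[i1]'hi1') = '/'
          · rw [if_pos hsl]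
            simp only [if_pos hsl]
            rfl
          · rw [if_neg hsl]
            simp only [if_neg hsl]
            simp

-- ===== VERDICT (by name: the statement is the Claim_ definition above) =====
theorem getFirstLetter_spec : Claim_equal_getFirstLetter := by
  intro text _ _
  unfold Spec_getFirstLetter getFirstLetter getFirstLetter_alt
  have h := goB_eq_goA text.toList text.toList.length 0 (by omega)
  rw [List.drop_zero] at h
  rw [← h]
  exact String.ofList_toList
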